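-- pv_equiv track=rewrite | github.com/a1wjun/kicad-kbplacer | kbplacer/kle_serial.py | find_best_label_alignment
-- ===== SOURCE A (Python) =====
-- from typing import Any, List, Optional, Tuple, Type
--
-- REVERSE_LABEL_MAP: List[List[int]] = [
--     # 0  1  2  3  4  5  6  7  8  9 10 11   # align flags
--     [ 0, 8, 2, 6, 9, 7, 1,10, 3, 4,11, 5], # 0 = no centering
--     [-1, 0,-1,-1, 6,-1,-1, 1,-1, 4,11, 5], # 1 = center x
--     [-1,-1,-1, 0, 8, 2,-1,-1,-1, 4,11, 5], # 2 = center y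
--     [-1,-1,-1,-1, 0,-1,-1,-1,-1, 4,11, 5], # 3 = center x & y
--     [ 0, 8, 2, 6, 9, 7, 1,10, 3,-1, 4,-1], # 4 = center front (default)
--     [-1, 0,-1,-1, 6,-1,-1, 1,-1,-1, 4,-1], # 5 = center front & x
--     [-1,-1,-1, 0, 8, 2,-1,-1,-1,-1, 4,-1], # 6 = center front & y
--     [-1,-1,-1,-1, 0,-1,-1,-1,-1,-1, 4,-1], # 7 = center front & x & y
-- ]
--
-- def reorder_items_kle(items, align) -> List[Any]:
--     ret: List[Any] = 12 * [None]
--     for i, label in enumerate(items):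
--         if label:
--             index = REVERSE_LABEL_MAP[align][i]
--             if index == -1:
--                 ret = []
--                 break
--             ret[index] = label
--     while ret and ret[-1] is None:
--         ret.pop()
--     return ret
--
-- def find_best_label_alignment(labels) -> Tuple[int, List[Any]]:
--     results = {}
--     for align in reversed(range(0, 8)):
--         if ret := reorder_items_kle(labels, align):
--             results[align] = ret
--
--     if results.items():
--         best = min(results.items(), key=lambda x: len(x[1]))
--         return best[0], best[1]
--     else:
--         return 0, []
-- ===== SOURCE B (Python) =====
-- from typing import Any, List, Tuple
--
-- REVERSE_LABEL_MAP: List[List[int]] = [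
--     [ 0, 8, 2, 6, 9, 7, 1,10, 3, 4,11, 5],
--     [-1, 0,-1,-1, 6,-1,-1, 1,-1, 4,11, 5],
--     [-1,-1,-1, 0, 8, 2,-1,-1,-1, 4,11, 5],
--     [-1,-1,-1,-1, 0,-1,-1,-1,-1, 4,11, 5],
--     [ 0, 8, 2, 6, 9, 7, 1,10, 3,-1, 4,-1],
--     [-1, 0,-1,-1, 6,-1,-1, 1,-1,-1, 4,-1],
--     [-1,-1,-1, 0, 8, 2,-1,-1,-1,-1, 4,-1],
--     [-1,-1,-1,-1, 0,-1,-1,-1,-1,-1, 4,-1],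
-- ]
--
-- def find_best_label_alignment(labels) -> Tuple[int, List[Any]]:
--     # choose the alignment by slot arithmetic only; build the output list once at the end
--     truthy = [(i, lab) for i, lab in enumerate(labels) if lab]
--     pick = None  # (align, packed length)
--     for align in range(8):
--         row = REVERSE_LABEL_MAP[align]
--         idxs = [row[i] for i, _ in truthy]
--         if not idxs or -1 in idxs:
--             continue
--         ln = max(idxs) + 1
--         if pick is None or ln <= pick[1]:
--             pick = (align, ln)
--     if pick is None:
--         return 0, []
--     align, ln = pick
--     out = [None] * ln
--     for i, lab in truthy:
--         out[REVERSE_LABEL_MAP[align][i]] = lab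
--     return align, out
-- ===== Notes on version B (the rewrite author's own statement) =====
-- stated objective: alternative
-- what changed: Replaces the dict of per-alignment reordered lists and the min-by-length pass with a single arithmetic scan that picks the best alignment from slot indices alone (emptiness and max slot), then materialises the output list once for the winning alignment.
import Mathlib
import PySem

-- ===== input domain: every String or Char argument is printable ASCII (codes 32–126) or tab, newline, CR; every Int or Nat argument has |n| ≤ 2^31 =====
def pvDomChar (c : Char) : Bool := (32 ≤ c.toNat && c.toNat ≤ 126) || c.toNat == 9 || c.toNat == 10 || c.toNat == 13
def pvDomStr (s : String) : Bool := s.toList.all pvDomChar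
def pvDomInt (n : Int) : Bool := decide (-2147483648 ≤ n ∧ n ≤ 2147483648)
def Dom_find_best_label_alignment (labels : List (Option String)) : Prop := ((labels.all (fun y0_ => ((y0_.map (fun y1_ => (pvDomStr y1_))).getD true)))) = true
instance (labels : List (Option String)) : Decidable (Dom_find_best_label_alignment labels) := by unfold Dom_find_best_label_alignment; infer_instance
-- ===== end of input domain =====

-- B picks the best alignment by slot arithmetic (max slot index) and builds the output list once,
-- instead of A's dict of per-alignment reordered lists plus a min-by-length pass (objective: alternative).


-- ===== PORT A =====
def REVERSE_LABEL_MAP : List (List Int) := [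
  [ 0, 8, 2, 6, 9, 7, 1,10, 3, 4,11, 5],
  [-1, 0,-1,-1, 6,-1,-1, 1,-1, 4,11, 5],
  [-1,-1,-1, 0, 8, 2,-1,-1,-1, 4,11, 5],
  [-1,-1,-1,-1, 0,-1,-1,-1,-1, 4,11, 5],
  [ 0, 8, 2, 6, 9, 7, 1,10, 3,-1, 4,-1],
  [-1, 0,-1,-1, 6,-1,-1, 1,-1,-1, 4,-1],
  [-1,-1,-1, 0, 8, 2,-1,-1,-1,-1, 4,-1],
  [-1,-1,-1,-1, 0,-1,-1,-1,-1,-1, 4,-1]]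

-- truthiness of a Python value that is None or a str
def pyTruthy (o : Option String) : Bool :=
  match o with
  | none => false
  | some s => !(s.toList.isEmpty)

-- REVERSE_LABEL_MAP[align][i]; exact whenever both indexings are in range (align ∈ 0..7 always,
-- and i < 12 inside Pre_); Python raises IndexError otherwise, which Pre_ excludes.
def rowIdx (align : Int) (i : Int) : Int :=
  (PySem.List.pyGet? ((PySem.List.pyGet? REVERSE_LABEL_MAP align).getD []) i).getD (-1)

-- the for-loop of reorder_items_kle, with its break (returning [])
def reorderLoop (align : Int) : List (Int × Option String) → List (Option String) → List (Option String)
  | [], ret => ret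
  | (i, lab) :: rest, ret =>
    if pyTruthy lab then
      let index := rowIdx align i
      if index = -1 then []
      else reorderLoop align rest (ret.set index.toNat lab)   -- index ∈ 0..11 here, so .set is exact
    else reorderLoop align rest ret

-- the `while ret and ret[-1] is None: ret.pop()` loop (pop from the back = drop from the reversed front)
def dropLeadingNones : List (Option String) → List (Option String)
  | none :: rest => dropLeadingNones rest
  | l => l

def reorder_items_kle (items : List (Option String)) (align : Int) : List (Option String) :=
  let ret := reorderLoop align (PySem.List.enumerate items) (List.replicate 12 none)
  (dropLeadingNones ret.reverse).reverse

def find_best_label_alignment (labels : List (Option String)) : Int × List (Option String) :=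
  let results : PySem.Dict Int (List (Option String)) :=
    ((PySem.List.pyRange 0 8 1).reverse).foldl (fun d align =>
      let ret := reorder_items_kle labels align
      if ret.isEmpty then d else d.insert align ret) PySem.Dict.empty
  if results.items.isEmpty then (0, [])
  else
    match PySem.List.min? results.items (fun x => (x.2.length : Int)) with
    | some best => (best.1, best.2)
    | none => (0, [])    -- unreachable: items is nonempty in this branch

-- ===== PORT B =====
def find_best_label_alignment_alt (labels : List (Option String)) : Int × List (Option String) :=
  let truthy := (PySem.List.enumerate labels).filter (fun p => pyTruthy p.2)
  let pick : Option (Int × Int) :=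
    (PySem.List.pyRange 0 8 1).foldl (fun best align =>
      let idxs := truthy.map (fun p => rowIdx align p.1)
      if idxs.isEmpty || idxs.contains (-1) then best
      else
        let ln := (PySem.List.max? idxs (fun x => x)).getD (-1) + 1   -- max(idxs) + 1; idxs ≠ [] here
        match best with
        | none => some (align, ln)
        | some (ba, bl) => if ln ≤ bl then some (align, ln) else some (ba, bl)) none
  match pick with
  | none => (0, [])
  | some (align, ln) =>
    (align, truthy.foldl (fun out p => out.set (rowIdx align p.1).toNat p.2)
              (List.replicate ln.toNat none))

-- ===== PRECONDITION & SPEC =====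
-- Pre_ excludes exactly the inputs where A raises IndexError: a truthy label at position ≥ 12
-- makes REVERSE_LABEL_MAP[align][i] raise (the align-0 row is always reached).
def Pre_find_best_label_alignment (labels : List (Option String)) : Prop :=
  ∀ o ∈ labels.drop 12, pyTruthy o = false
instance (labels : List (Option String)) : Decidable (Pre_find_best_label_alignment labels) := by
  unfold Pre_find_best_label_alignment; infer_instance

def pvWitness_find_best_label_alignment : List (Option String) :=
  [some "a", none, some "", some "b"]

def Spec_find_best_label_alignment (labels : List (Option String)) (out : Int × List (Option String)) : Prop := out = find_best_label_alignment_alt labels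
instance (labels : List (Option String)) (out : Int × List (Option String)) : Decidable (Spec_find_best_label_alignment labels out) := by unfold Spec_find_best_label_alignment; infer_instance

-- ===== CLAIM (what is proved, stated in full; the proofs are below) =====
def Claim_equal_find_best_label_alignment : Prop := ∀ (labels : List (Option String)), Dom_find_best_label_alignment labels → Pre_find_best_label_alignment labels → Spec_find_best_label_alignment labels (find_best_label_alignment labels)

-- ===== LEMMAS AND PROOFS =====

-- ABBREVIATIONS for the proofs (the same expressions the ports compute)
def truthyOf (labels : List (Option String)) : List (Int × Option String) :=
  (PySem.List.enumerate labels).filter (fun p => pyTruthy p.2)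

def idxsOf (labels : List (Option String)) (a : Int) : List Int :=
  (truthyOf labels).map (fun p => rowIdx a p.1)

def setFold (a : Int) (ps : List (Int × Option String)) (acc : List (Option String)) : List (Option String) :=
  ps.foldl (fun out p => out.set (rowIdx a p.1).toNat p.2) acc

def lnOf (labels : List (Option String)) (a : Int) : Int :=
  (PySem.List.max? (idxsOf labels a) (fun x => x)).getD (-1) + 1

-- every table entry reachable with align ∈ [0,8) and i ∈ [0,12) is -1 or lies in [0,12)
lemma rowIdx_table : ∀ a ∈ PySem.List.pyRange 0 8 1, ∀ i ∈ PySem.List.pyRange 0 12 1,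
    rowIdx a i = -1 ∨ (0 ≤ rowIdx a i ∧ rowIdx a i < 12) := by decide

-- members of the truthy list: index in [0,12) under Pre_, and the label is truthy
lemma mem_truthyOf {labels : List (Option String)} {p : Int × Option String}
    (hpre : Pre_find_best_label_alignment labels) (hp : p ∈ truthyOf labels) :
    0 ≤ p.1 ∧ p.1 < 12 ∧ pyTruthy p.2 = true := by
  unfold truthyOf at hp
  rw [List.mem_filter] at hp
  obtain ⟨hmem, htr⟩ := hp
  rw [PySem.List.mem_enumerate_iff] at hmem
  obtain ⟨k, hk, rfl⟩ := hmem
  simp only [zero_add] at htr ⊢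
  refine ⟨by positivity, ?_, htr⟩
  by_contra hlt
  rw [not_lt] at hlt
  have h12 : (12:Nat) ≤ k := by exact_mod_cast hlt
  have hmem' : labels[k] ∈ labels.drop 12 := by
    have hkk : k - 12 < (labels.drop 12).length := by
      rw [List.length_drop]; omega
    have : (labels.drop 12)[k - 12] = labels[k] := by
      rw [List.getElem_drop]
      congr 1; omega
    rw [← this]
    exact List.getElem_mem hkk
  have := hpre _ hmem'
  rw [this] at htr
  exact Bool.noConfusion htr

lemma rowIdx_cases {labels : List (Option String)} {a : Int} {p : Int × Option String}
    (hpre : Pre_find_best_label_alignment labels) (ha : 0 ≤ a ∧ a < 8)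
    (hp : p ∈ truthyOf labels) :
    rowIdx a p.1 = -1 ∨ (0 ≤ rowIdx a p.1 ∧ rowIdx a p.1 < 12) := by
  obtain ⟨h0, h12, -⟩ := mem_truthyOf hpre hp
  exact rowIdx_table a (by rw [PySem.List.mem_pyRange_one]; exact ha)
    p.1 (by rw [PySem.List.mem_pyRange_one]; exact ⟨h0, h12⟩)

-- the loop of reorder_items_kle: break on any -1, otherwise a fold of list-writes
lemma reorderLoop_eq (a : Int) : ∀ (E : List (Int × Option String)) (ret : List (Option String)),
    reorderLoop a E ret =
      if ((E.filter (fun p => pyTruthy p.2)).map (fun p => rowIdx a p.1)).contains (-1) then []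
      else setFold a (E.filter (fun p => pyTruthy p.2)) ret := by
  intro E
  induction E with
  | nil => intro ret; simp [reorderLoop, setFold]
  | cons q rest ih =>
    intro ret
    obtain ⟨i, lab⟩ := q
    by_cases ht : pyTruthy lab
    · by_cases hneg : rowIdx a i = -1
      · simp [reorderLoop, ht, hneg]
      · have hbeq : ((-1 : Int) == rowIdx a i) = false := by
          simp only [beq_eq_false_iff_ne, ne_eq]
          omega
        simp only [reorderLoop, ht, if_true, hneg, if_false, ih,
          List.filter_cons, List.map_cons, List.contains_cons, hbeq, Bool.false_or]
        simp [setFold]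
    · have hf : List.filter (fun p => pyTruthy p.2) ((i, lab) :: rest) =
          List.filter (fun p => pyTruthy p.2) rest := by
        rw [List.filter_cons_of_neg]; simpa using ht
      simp only [reorderLoop, ht, ih, hf]
      simp

lemma setFold_length (a : Int) : ∀ (ps : List (Int × Option String)) (acc : List (Option String)),
    (setFold a ps acc).length = acc.length := by
  intro ps
  induction ps with
  | nil => intro acc; rfl
  | cons p rest ih =>
    intro acc
    simp only [setFold, List.foldl_cons] at ih ⊢
    rw [ih, List.length_set]

lemma setFold_append (a : Int) : ∀ (ps : List (Int × Option String)) (l1 l2 : List (Option String)),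
    (∀ p ∈ ps, (rowIdx a p.1).toNat < l1.length) →
    setFold a ps (l1 ++ l2) = setFold a ps l1 ++ l2 := by
  intro ps
  induction ps with
  | nil => intro l1 l2 _; rfl
  | cons p rest ih =>
    intro l1 l2 hb
    simp only [setFold, List.foldl_cons] at ih ⊢
    rw [List.set_append_left _ _ (hb p (by simp)), ih]
    intro q hq
    rw [List.length_set]
    exact hb q (by simp [hq])

lemma setFold_get_some (a : Int) : ∀ (ps : List (Int × Option String)) (acc : List (Option String)) (m : Nat),
    (∀ p ∈ ps, pyTruthy p.2 = true) → m < acc.length →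
    ((∃ p ∈ ps, (rowIdx a p.1).toNat = m) ∨ ∃ s, acc[m]? = some (some s)) →
    ∃ s, (setFold a ps acc)[m]? = some (some s) := by
  intro ps
  induction ps with
  | nil =>
    intro acc m _ hm h
    rcases h with ⟨p, hp, -⟩ | hs
    · exact absurd hp (List.not_mem_nil)
    · exact hs
  | cons p rest ih =>
    intro acc m htr hm h
    have hps : ∃ s, p.2 = some s := by
      have := htr p (by simp)
      cases hp2 : p.2 with
      | none => rw [hp2] at this; simp [pyTruthy] at this
      | some s => exact ⟨s, rfl⟩
    obtain ⟨s0, hs0⟩ := hps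
    simp only [setFold, List.foldl_cons] at ih ⊢
    by_cases he : (rowIdx a p.1).toNat = m
    · refine ih _ _ (fun q hq => htr q (by simp [hq])) (by rw [List.length_set]; exact hm) (Or.inr ⟨s0, ?_⟩)
      rw [← he, List.getElem?_set_self (by rw [he]; exact hm), hs0]
    · rcases h with ⟨q, hq, hqm⟩ | ⟨s, hs⟩
      · rcases List.mem_cons.mp hq with rfl | hq'
        · exact absurd hqm he
        · exact ih _ _ (fun q hq => htr q (by simp [hq])) (by rw [List.length_set]; exact hm) (Or.inl ⟨q, hq', hqm⟩)
      · refine ih _ _ (fun q hq => htr q (by simp [hq])) (by rw [List.length_set]; exact hm) (Or.inr ⟨s, ?_⟩)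
        rw [List.getElem?_set_ne he, hs]

lemma dropLeadingNones_replicate_append : ∀ (k : Nat) (l : List (Option String)),
    dropLeadingNones (List.replicate k none ++ l) = dropLeadingNones l := by
  intro k
  induction k with
  | zero => intro l; rfl
  | succ n ih =>
    intro l
    rw [List.replicate_succ, List.cons_append]
    show dropLeadingNones (List.replicate n none ++ l) = dropLeadingNones l
    exact ih l

lemma dropLeadingNones_head {l : List (Option String)} {s : String}
    (h : l.head? = some (some s)) : dropLeadingNones l = l := by
  cases l with
  | nil => simp at h
  | cons x t =>
    simp only [List.head?_cons, Option.some_inj] at h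
    subst h
    rfl

-- per-alignment characterisation of reorder_items_kle, for align ∈ [0,8) under Pre_
lemma reorder_invalid {labels : List (Option String)} {a : Int}
    (h : idxsOf labels a = [] ∨ (-1) ∈ idxsOf labels a) :
    reorder_items_kle labels a = [] := by
  unfold reorder_items_kle
  rw [reorderLoop_eq]
  have e : List.filter (fun p => pyTruthy p.2) (PySem.List.enumerate labels) = truthyOf labels := rfl
  rw [e]
  rcases h with h | h
  · have hT : truthyOf labels = [] := List.map_eq_nil_iff.mp h
    rw [hT]
    rfl
  · have hc : ((truthyOf labels).map (fun p => rowIdx a p.1)).contains (-1) = true := by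
      have : (-1 : Int) ∈ idxsOf labels a := h
      unfold idxsOf at this
      simpa using this
    rw [hc]
    rfl

lemma reorder_valid {labels : List (Option String)} {a : Int}
    (hpre : Pre_find_best_label_alignment labels) (ha : 0 ≤ a ∧ a < 8)
    (h1 : idxsOf labels a ≠ []) (h2 : (-1) ∉ idxsOf labels a) :
    reorder_items_kle labels a =
      setFold a (truthyOf labels) (List.replicate (lnOf labels a).toNat none) ∧
    (reorder_items_kle labels a).length = (lnOf labels a).toNat ∧
    1 ≤ (lnOf labels a).toNat := by
  obtain ⟨m', hm'⟩ : ∃ m', PySem.List.max? (idxsOf labels a) (fun x => x) = some m' := by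
    cases hmx : PySem.List.max? (idxsOf labels a) (fun x => x) with
    | none => exact absurd ((PySem.List.max?_eq_none_iff _ _).mp hmx) h1
    | some m' => exact ⟨m', rfl⟩
  have hmem : m' ∈ idxsOf labels a := PySem.List.max?_mem hm'
  have hmax : ∀ x ∈ idxsOf labels a, x ≤ m' := by
    intro x hx; simpa using PySem.List.max?_isMax hm' x hx
  have hbounds : ∀ x ∈ idxsOf labels a, 0 ≤ x ∧ x < 12 := by
    intro x hx
    obtain ⟨p, hp, hpe⟩ := List.mem_map.mp hx
    rcases rowIdx_cases hpre ha hp with hneg | hb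
    · rw [hpe] at hneg; rw [hneg] at hx; exact absurd hx h2
    · rw [← hpe]; exact hb
  have hm0 : 0 ≤ m' ∧ m' < 12 := hbounds m' hmem
  have hlnv : lnOf labels a = m' + 1 := by unfold lnOf; rw [hm']; rfl
  have hln1 : 1 ≤ (lnOf labels a).toNat ∧ (lnOf labels a).toNat ≤ 12 := by omega
  have hbnd : ∀ p ∈ truthyOf labels, (rowIdx a p.1).toNat < (lnOf labels a).toNat := by
    intro p hp
    have hmm : rowIdx a p.1 ∈ idxsOf labels a := List.mem_map_of_mem hp
    have h1' := hmax _ hmm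
    have h2' := (hbounds _ hmm).1
    omega
  unfold reorder_items_kle
  rw [reorderLoop_eq]
  have e : List.filter (fun p => pyTruthy p.2) (PySem.List.enumerate labels) = truthyOf labels := rfl
  rw [e]
  have hc : ((truthyOf labels).map (fun p => rowIdx a p.1)).contains (-1) = false := by
    have : (-1 : Int) ∉ idxsOf labels a := h2
    unfold idxsOf at this
    simpa using this
  rw [hc]
  simp only [Bool.false_eq_true, if_false]
  have h12 : (12 : Nat) = (lnOf labels a).toNat + (12 - (lnOf labels a).toNat) := by omega
  rw [h12, List.replicate_add,
    setFold_append a _ _ _ (by simpa [List.length_replicate] using hbnd)]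
  have hlen : (setFold a (truthyOf labels) (List.replicate (lnOf labels a).toNat none)).length
      = (lnOf labels a).toNat := by rw [setFold_length, List.length_replicate]
  obtain ⟨s, hs⟩ : ∃ s, (setFold a (truthyOf labels)
      (List.replicate (lnOf labels a).toNat none))[(lnOf labels a).toNat - 1]? = some (some s) := by
    apply setFold_get_some
    · intro q hq; exact (List.mem_filter.mp hq).2
    · rw [List.length_replicate]; omega
    · left
      obtain ⟨p, hp, hpe⟩ := List.mem_map.mp hmem
      exact ⟨p, hp, by omega⟩
  rw [List.reverse_append, List.reverse_replicate, dropLeadingNones_replicate_append]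
  rw [dropLeadingNones_head (s := s) (by rw [List.head?_reverse, List.getLast?_eq_getElem?, hlen]; exact hs),
    List.reverse_reverse]
  exact ⟨rfl, hlen, by omega⟩

-- the dict loop of A: distinct fresh keys, so items is a filterMap
lemma dict_items (R : Int → List (Option String)) :
    ∀ (ys : List Int) (d : PySem.Dict Int (List (Option String))), ys.Nodup →
    (∀ a ∈ ys, d.contains a = false) →
    (ys.foldl (fun d a => if (R a).isEmpty then d else d.insert a (R a)) d).items =
      d.items ++ ys.filterMap (fun a => if (R a).isEmpty then none else some (a, R a)) := by
  intro ys
  induction ys with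
  | nil => intro d _ _; simp
  | cons a ys ih =>
    intro d hnd hc
    rw [List.foldl_cons, List.filterMap_cons]
    by_cases he : (R a).isEmpty
    · simp only [he, if_true]
      exact ih d hnd.of_cons (fun b hb => hc b (by simp [hb]))
    · simp only [he, Bool.false_eq_true, if_false]
      rw [ih _ hnd.of_cons ?_, PySem.Dict.items_insert_of_not_contains d _ (hc a (by simp))]
      · simp
      · intro b hb
        rw [PySem.Dict.contains_insert]
        have hba : b ≠ a := by
          intro hba; rw [hba] at hb
          exact (List.nodup_cons.mp hnd).1 hb
        simp [hba, hc b (by simp [hb])]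

-- selection machinery: A's first-minimum over the reversed candidate list equals
-- B's last-wins running minimum over the candidate list
def kA (q : Int × List (Option String)) : Int := (q.2.length : Int)

def gpair (q : Int × List (Option String)) : Int × Int := (q.1, kA q)

-- one step of a later-wins running minimum (foldr direction)
def stepFR (x : Int × List (Option String)) (r : Option (Int × List (Option String))) :
    Option (Int × List (Option String)) :=
  match r with
  | none => some x
  | some m => if kA m ≤ kA x then some m else some x

def FRmin (N : List (Int × List (Option String))) : Option (Int × List (Option String)) :=
  N.foldr stepFR none

-- one step of a later-wins running minimum (foldl direction)
def stepN (acc : Option (Int × List (Option String))) (q : Int × List (Option String)) :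
    Option (Int × List (Option String)) :=
  match acc with
  | none => some q
  | some x => if kA q ≤ kA x then some q else some x

def m2 (acc r : Option (Int × List (Option String))) : Option (Int × List (Option String)) :=
  match r with
  | none => acc
  | some m => match acc with
    | none => some m
    | some x => if kA m ≤ kA x then some m else some x

-- A's first-minimum over the reversed candidate list is the later-wins minimum over the list
lemma min?_reverse_eq_FRmin (N : List (Int × List (Option String))) :
    PySem.List.min? N.reverse kA = FRmin N := by
  induction N with
  | nil => rfl
  | cons x t ih =>
    rw [List.reverse_cons]
    simp only [PySem.List.min?, List.foldl_append, List.foldl_cons, List.foldl_nil] at ih ⊢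
    rw [ih]
    have hfr : FRmin (x :: t) = stepFR x (FRmin t) := rfl
    rw [hfr]
    cases FRmin t with
    | none => rfl
    | some m =>
      show (if kA x < kA m then some x else some m) = if kA m ≤ kA x then some m else some x
      split_ifs <;> first | rfl | omega

lemma map_stepN (acc : Option (Int × List (Option String))) (q : Int × List (Option String)) :
    (match acc.map gpair with
      | none => some (gpair q)
      | some (ba, bl) => if kA q ≤ bl then some (gpair q) else some (ba, bl)) =
    (stepN acc q).map gpair := by
  cases acc <;> simp [stepN, gpair] <;> split_ifs <;> rfl

lemma m2_stepN (acc r : Option (Int × List (Option String))) (q : Int × List (Option String)) :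
    m2 (stepN acc q) r = m2 acc (stepFR q r) := by
  cases acc with
  | none =>
    cases r with
    | none => rfl
    | some m =>
      show m2 (some q) (some m) = m2 none (if kA m ≤ kA q then some m else some q)
      by_cases h2 : kA m ≤ kA q <;>
        simp only [h2, if_true, if_false, m2] <;> split_ifs <;> first | rfl | omega
  | some x =>
    cases r with
    | none => rfl
    | some m =>
      show m2 (if kA q ≤ kA x then some q else some x) (some m) =
        m2 (some x) (if kA m ≤ kA q then some m else some q)
      by_cases h1 : kA q ≤ kA x <;> by_cases h2 : kA m ≤ kA q <;>
        simp only [h1, h2, if_true, if_false, m2] <;> split_ifs <;> first | rfl | omega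

lemma foldl_le_eq_FRmin : ∀ (N : List (Int × List (Option String)))
    (acc : Option (Int × List (Option String))),
    N.foldl (fun best q => match best with
      | none => some (gpair q)
      | some (ba, bl) => if kA q ≤ bl then some (gpair q) else some (ba, bl)) (acc.map gpair) =
    (m2 acc (FRmin N)).map gpair := by
  intro N
  induction N with
  | nil =>
    intro acc
    cases acc <;> rfl
  | cons q t ih =>
    intro acc
    simp only [List.foldl_cons]
    rw [map_stepN, ih, m2_stepN]
    rfl

lemma FRmin_mem {N : List (Int × List (Option String))} {m : Int × List (Option String)}
    (h : FRmin N = some m) : m ∈ N := by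
  induction N with
  | nil => exact absurd h (by simp [FRmin])
  | cons x t ih =>
    have hfr : FRmin (x :: t) = stepFR x (FRmin t) := rfl
    rw [hfr] at h
    cases hr : FRmin t with
    | none => rw [hr] at h; simp [stepFR] at h; simp [h]
    | some m' =>
      rw [hr] at h
      simp only [stepFR] at h
      by_cases hle : kA m' ≤ kA x
      · rw [if_pos hle] at h
        simp only [Option.some_inj] at h
        exact List.mem_cons_of_mem _ (ih (h ▸ hr))
      · rw [if_neg hle] at h
        simp at h
        simp [h]


-- the two ports, written with the proof abbreviations (definitional equalities)
def ADict (labels : List (Option String)) : PySem.Dict Int (List (Option String)) :=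
  ((PySem.List.pyRange 0 8 1).reverse).foldl (fun d align =>
    if (reorder_items_kle labels align).isEmpty then d
    else d.insert align (reorder_items_kle labels align)) PySem.Dict.empty

def phi (labels : List (Option String)) (a : Int) : Option (Int × List (Option String)) :=
  if (reorder_items_kle labels a).isEmpty then none else some (a, reorder_items_kle labels a)

def Bstep (labels : List (Option String)) (best : Option (Int × Int)) (align : Int) :
    Option (Int × Int) :=
  if (idxsOf labels align).isEmpty || (idxsOf labels align).contains (-1) then best
  else match best with
    | none => some (align, lnOf labels align)
    | some (ba, bl) => if lnOf labels align ≤ bl then some (align, lnOf labels align)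
                       else some (ba, bl)

lemma A_as_ADict (labels : List (Option String)) : find_best_label_alignment labels =
    (if (ADict labels).items.isEmpty then ((0 : Int), ([] : List (Option String)))
     else match PySem.List.min? (ADict labels).items (fun x => (x.2.length : Int)) with
       | some best => (best.1, best.2)
       | none => (0, [])) := rfl

lemma B_as_Bstep (labels : List (Option String)) : find_best_label_alignment_alt labels =
    (match (PySem.List.pyRange 0 8 1).foldl (Bstep labels) none with
     | none => ((0 : Int), ([] : List (Option String)))
     | some (align, ln) =>
        (align, setFold align (truthyOf labels) (List.replicate ln.toNat none))) := rfl

-- B's candidate loop, restricted to the valid alignments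
lemma Bstep_fold {labels : List (Option String)}
    (hpre : Pre_find_best_label_alignment labels) :
    ∀ (l : List Int), (∀ a ∈ l, 0 ≤ a ∧ a < 8) → ∀ (acc : Option (Int × Int)),
    l.foldl (Bstep labels) acc =
    (l.filterMap (phi labels)).foldl (fun best q => match best with
      | none => some (gpair q)
      | some (ba, bl) => if kA q ≤ bl then some (gpair q) else some (ba, bl)) acc := by
  intro l
  induction l with
  | nil => intro _ acc; rfl
  | cons a l ih =>
    intro hb acc
    rw [List.foldl_cons, List.filterMap_cons]
    by_cases hI : idxsOf labels a = [] ∨ (-1) ∈ idxsOf labels a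
    · have hR : reorder_items_kle labels a = [] := reorder_invalid hI
      have hphi : phi labels a = none := by simp [phi, hR]
      have hguard : ((idxsOf labels a).isEmpty || (idxsOf labels a).contains (-1)) = true := by
        rcases hI with h | h
        · simp [h]
        · simp [h]
      have hstep : Bstep labels acc a = acc := by
        unfold Bstep
        rw [hguard]
        simp
      rw [hphi, hstep]
      exact ih (fun b hb' => hb b (by simp [hb'])) acc
    · rw [not_or] at hI
      obtain ⟨h1, h2⟩ := hI
      have ha : 0 ≤ a ∧ a < 8 := hb a (by simp)
      obtain ⟨hEq, hLen, hPos⟩ := reorder_valid hpre ha h1 h2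
      have hguard : ((idxsOf labels a).isEmpty || (idxsOf labels a).contains (-1)) = false := by
        simp [h1, h2]
      have hRne : (reorder_items_kle labels a).isEmpty = false := by
        refine List.isEmpty_eq_false_iff.mpr (fun hc => ?_)
        rw [hc] at hLen
        simp at hLen
        omega
      have hphi : phi labels a = some (a, reorder_items_kle labels a) := by
        simp [phi, hRne]
      have hk : kA (a, reorder_items_kle labels a) = lnOf labels a := by
        simp only [kA]
        rw [hLen]
        omega
      have hg : gpair (a, reorder_items_kle labels a) = (a, lnOf labels a) := by
        simp only [gpair, hk]
      have hstep : Bstep labels acc a =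
          (fun best q => match best with
            | none => some (gpair q)
            | some (ba, bl) => if kA q ≤ bl then some (gpair q) else some (ba, bl)) acc
            (a, reorder_items_kle labels a) := by
        simp only [Bstep, hguard, Bool.false_eq_true, if_false]
        cases acc with
        | none => simp [hg]
        | some x =>
          obtain ⟨ba, bl⟩ := x
          show (if lnOf labels a ≤ bl then some (a, lnOf labels a) else some (ba, bl)) =
            if kA (a, reorder_items_kle labels a) ≤ bl
            then some (gpair (a, reorder_items_kle labels a)) else some (ba, bl)
          rw [hk, hg]
      rw [hphi, hstep, List.foldl_cons]
      exact ih (fun b hb' => hb b (by simp [hb'])) _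

-- ===== VERDICT (by name: the statement is the Claim_ definition above) =====
theorem find_best_label_alignment_spec : Claim_equal_find_best_label_alignment := by
  intro labels _hdom hpre
  unfold Spec_find_best_label_alignment
  rw [A_as_ADict, B_as_Bstep]
  have hnd : ((PySem.List.pyRange 0 8 1).reverse).Nodup := by decide
  have hitems : (ADict labels).items =
      ((PySem.List.pyRange 0 8 1).reverse).filterMap (phi labels) :=
    dict_items (fun a => reorder_items_kle labels a) _ _ hnd
      (fun a _ => PySem.Dict.contains_empty a)
  rw [hitems, List.filterMap_reverse]
  have hrange : ∀ a ∈ PySem.List.pyRange 0 8 1, 0 ≤ a ∧ a < 8 := by decide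
  rw [Bstep_fold hpre _ hrange]
  set N := (PySem.List.pyRange 0 8 1).filterMap (phi labels) with hNdef
  cases hN : N with
  | nil => rfl
  | cons q t =>
    have hne : N ≠ [] := by rw [hN]; exact List.cons_ne_nil q t
    have hie : N.reverse.isEmpty = false := by
      refine List.isEmpty_eq_false_iff.mpr ?_
      simp [hN]
    have hmin : PySem.List.min? N.reverse (fun x => (x.2.length : Int)) = FRmin N :=
      min?_reverse_eq_FRmin N
    obtain ⟨m, hm⟩ : ∃ m, FRmin N = some m := by
      cases hfr : FRmin N with
      | none =>
        exfalso
        apply hne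
        have := hmin.trans hfr
        rw [← List.reverse_eq_nil_iff]
        exact (PySem.List.min?_eq_none_iff _ _).mp this
      | some m => exact ⟨m, rfl⟩
    have hfold : N.foldl (fun best q => match best with
        | none => some (gpair q)
        | some (ba, bl) => if kA q ≤ bl then some (gpair q) else some (ba, bl)) none =
        some (gpair m) := by
      have h0 := foldl_le_eq_FRmin N none
      simp only [Option.map_none] at h0
      rw [hm] at h0
      simpa [m2] using h0
    rw [← hN, hie, hmin, hm, hfold]
    simp only [Bool.false_eq_true, if_false]
    obtain ⟨a, hal, hphi⟩ := List.mem_filterMap.mp (FRmin_mem hm)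
    have hIv : ¬(idxsOf labels a = [] ∨ (-1) ∈ idxsOf labels a) := by
      intro hI
      have hR := reorder_invalid hI
      simp [phi, hR] at hphi
    rw [not_or] at hIv
    obtain ⟨h1, h2⟩ := hIv
    obtain ⟨hEq, hLen, hPos⟩ := reorder_valid hpre (hrange a hal) h1 h2
    have hRne : (reorder_items_kle labels a).isEmpty = false := by
      refine List.isEmpty_eq_false_iff.mpr (fun hc => ?_)
      rw [hc] at hLen
      simp at hLen
      omega
    have hmAR : m = (a, reorder_items_kle labels a) := by
      simp only [phi, hRne, Bool.false_eq_true, if_false, Option.some_inj] at hphi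
      exact hphi.symm
    rw [hmAR]
    simp only [gpair, kA]
    have hcast : (((reorder_items_kle labels a).length : Int)).toNat = (lnOf labels a).toNat := by
      rw [Int.toNat_natCast, hLen]
    rw [hcast, ← hEq]
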